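-- pv_equiv track=rewrite | github.com/wayneshix/bril | assignment/task2/reach_definitions_solver.py | meet
-- ===== SOURCE A (Python) =====
-- def meet(facts):
--     # The meet operator for constants is intersection
--     result = {}
--     keys = set().union(*[fact.keys() for fact in facts])
--     for key in keys:
--         values = {fact.get(key, 'Top') for fact in facts}
--         if len(values) == 1:
--             result[key] = values.pop()
--         else:
--             # If the variable has different values along paths, it's 'Bottom' (non-constant)
--             result[key] = 'Bottom'
--     return result
-- ===== SOURCE B (Python) =====
-- def meet(facts):
--     # One pass over each fact's items, tracking per key (first value, #facts containing it, all-equal flag).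
--     n = len(facts)
--     state = {}
--     for fact in facts:
--         for k, v in fact.items():
--             if k in state:
--                 val, cnt, same = state[k]
--                 state[k] = (val, cnt + 1, same and v == val)
--             else:
--                 state[k] = (v, 1, True)
--     result = {}
--     for k, (val, cnt, same) in state.items():
--         if same and (cnt == n or val == 'Top'):
--             result[k] = val
--         else:
--             result[k] = 'Bottom'
--     return result
-- ===== Notes on version B (the rewrite author's own statement) =====
-- stated objective: faster
-- what changed: Instead of A's per-key rescan of every fact (union of key sets, then for each key a set comprehension over all facts), B makes a single pass over each fact's items, accumulating per key the first seen value, the number of facts containing the key and an all-values-equal flag, and derives each key's result from that summary.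
import Mathlib
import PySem

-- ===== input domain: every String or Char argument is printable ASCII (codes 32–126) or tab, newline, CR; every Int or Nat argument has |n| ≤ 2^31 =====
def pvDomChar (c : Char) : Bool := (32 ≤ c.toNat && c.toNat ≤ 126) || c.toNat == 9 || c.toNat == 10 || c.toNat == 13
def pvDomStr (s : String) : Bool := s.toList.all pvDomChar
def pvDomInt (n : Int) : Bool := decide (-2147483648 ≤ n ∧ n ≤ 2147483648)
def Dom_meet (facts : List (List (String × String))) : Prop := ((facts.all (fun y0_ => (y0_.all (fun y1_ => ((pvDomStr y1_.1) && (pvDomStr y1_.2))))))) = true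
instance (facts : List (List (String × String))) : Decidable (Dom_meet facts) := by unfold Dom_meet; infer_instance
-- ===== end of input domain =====

-- B replaces A's per-key rescan of every fact (O(keys·facts)) by a single pass over each fact's
-- items accumulating per key the first value, the number of facts containing the key and an
-- all-values-equal flag (O(total entries)).

-- ===== PORT A =====
-- helper: the value A stores for `key`: the element of the singleton set
-- {fact.get(key,'Top') for fact in facts} (values.pop()), else 'Bottom'
def meetVal (dfacts : List (PySem.Dict String String)) (key : String) : String :=
  match (PySem.Set.ofList (dfacts.map (fun f => f.getD key "Top")) : PySem.Set String) with
  | [v] => v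
  | _ => "Bottom"

def meet (facts : List (List (String × String))) : List (String × String) :=
  let dfacts := facts.map (fun f => PySem.Dict.ofList f)
  let keys : PySem.Set String := PySem.Set.ofList (dfacts.flatMap (fun f => f.keys))
  (keys.foldl (fun res key => res.insert key (meetVal dfacts key)) PySem.Dict.empty).items

-- ===== PORT B =====
-- state update for one (key, value) item of a fact
def meetAltUpd (st : PySem.Dict String (String × Int × Bool)) (kv : String × String) :
    PySem.Dict String (String × Int × Bool) :=
  match st.get? kv.1 with
  | some (v0, cnt, same) => st.insert kv.1 (v0, cnt + 1, same && (kv.2 == v0))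
  | none => st.insert kv.1 (kv.2, 1, true)

-- final per-key result from the accumulated (value, count, all-equal) state
def meetAltOut (n : Int) (kv : String × (String × Int × Bool)) : String :=
  if kv.2.2.2 && (kv.2.2.1 == n || kv.2.1 == "Top") then kv.2.1 else "Bottom"

def meet_alt (facts : List (List (String × String))) : List (String × String) :=
  let n : Int := facts.length
  let dfacts := facts.map (fun f => PySem.Dict.ofList f)
  let state := dfacts.foldl (fun (st : PySem.Dict String (String × Int × Bool)) (f : PySem.Dict String String) => f.items.foldl meetAltUpd st) PySem.Dict.empty
  (state.items.foldl (fun res kv => res.insert kv.1 (meetAltOut n kv)) PySem.Dict.empty).items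

-- ===== PRECONDITION & SPEC =====
def Spec_meet (facts : List (List (String × String))) (out : List (String × String)) : Prop := out = meet_alt facts
instance (facts : List (List (String × String))) (out : List (String × String)) : Decidable (Spec_meet facts out) := by unfold Spec_meet; infer_instance

-- ===== CLAIM (what is proved, stated in full; the proofs are below) =====
def Claim_equal_meet : Prop := ∀ (facts : List (List (String × String))), Dom_meet facts → Spec_meet facts (meet facts)

-- ===== LEMMAS AND PROOFS =====

-- the values fact.get(key) of the facts that contain `key`, in fact order
def pvVals (L : List (PySem.Dict String String)) (k : String) : List String :=
  L.flatMap (fun f => (f.get? k).toList)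

-- the values of `k` among a list of raw items
def pvVals' (ps : List (String × String)) (k : String) : List String :=
  ps.filterMap (fun p => if p.1 = k then some p.2 else none)

-- extend a per-key state by a further list of observed values
def pvComb (o : Option (String × Int × Bool)) (vs : List String) : Option (String × Int × Bool) :=
  match o with
  | none =>
    match vs with
    | [] => none
    | v :: vs' => some (v, 1 + (vs'.length : Int), vs'.all (· == v))
  | some (v0, c, s) => some (v0, c + vs.length, s && vs.all (· == v0))

theorem pvComb_nil (o : Option (String × Int × Bool)) : pvComb o [] = o := by
  rcases o with _ | ⟨v0, c, s⟩ <;> simp [pvComb]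

theorem pvComb_append (o : Option (String × Int × Bool)) (vs ws : List String) :
    pvComb o (vs ++ ws) = pvComb (pvComb o vs) ws := by
  rcases o with _ | ⟨v0, c, s⟩
  · rcases vs with _ | ⟨v, vs'⟩
    · rfl
    · simp [pvComb, List.all_append]; ring
  · simp [pvComb, List.all_append, Bool.and_assoc]; ring

theorem meetAltUpd_get? (st : PySem.Dict String (String × Int × Bool)) (kv : String × String)
    (k : String) :
    (meetAltUpd st kv).get? k =
      if k = kv.1 then pvComb (st.get? kv.1) [kv.2] else st.get? k := by
  unfold meetAltUpd
  cases h : st.get? kv.1 with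
  | none => by_cases hk : k = kv.1 <;> simp [pvComb, PySem.Dict.get?_insert, hk, h]
  | some t =>
    obtain ⟨v0, c, s⟩ := t
    by_cases hk : k = kv.1 <;> simp [pvComb, PySem.Dict.get?_insert, hk, h]

theorem inner_get (ps : List (String × String)) (k : String) :
    ∀ st, (ps.foldl meetAltUpd st).get? k = pvComb (st.get? k) (pvVals' ps k) := by
  induction ps with
  | nil => intro st; simp [pvVals', pvComb_nil]
  | cons p ps ih =>
    intro st
    rw [List.foldl_cons, ih, meetAltUpd_get?]
    by_cases hk : k = p.1
    · have h1 : pvVals' (p :: ps) k = [p.2] ++ pvVals' ps k := by simp [pvVals', hk]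
      rw [if_pos hk, ← hk, h1, pvComb_append]
    · have hne : p.1 ≠ k := fun h => hk h.symm
      have h1 : pvVals' (p :: ps) k = pvVals' ps k := by simp [pvVals', hne]
      rw [if_neg hk, h1]

theorem dict_vals' (f : PySem.Dict String String) (h : f.keys.Nodup) (k : String) :
    pvVals' f.items k = (f.get? k).toList := by
  obtain ⟨ps⟩ := f
  simp only [PySem.Dict.keys_mk] at h
  induction ps with
  | nil => rfl
  | cons p ps ih =>
    simp only [List.map_cons, List.nodup_cons] at h
    rw [PySem.Dict.get?_mk_cons]
    by_cases hpk : p.1 = k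
    · have hnone : pvVals' ps k = [] := by
        rw [pvVals', List.filterMap_eq_nil_iff]
        intro a ha
        have : a.1 ≠ k := fun hak => h.1 (hpk ▸ hak ▸ List.mem_map_of_mem ha)
        simp [this]
      simp [pvVals', hpk, hnone]
      intro a b hab hak
      have hm : a ∈ List.map (fun x => x.1) ps := List.mem_map_of_mem hab
      rw [hak, ← hpk] at hm
      exact h.1 hm
    · have hb : (p.1 == k) = false := by simp [hpk]
      simp only [pvVals', List.filterMap_cons, if_neg hpk, hb, Bool.false_eq_true, if_false]
      exact ih h.2

theorem state_get (L : List (PySem.Dict String String)) (k : String)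
    (hL : ∀ f ∈ L, f.keys.Nodup) :
    ∀ st, ((L.foldl (fun (st : PySem.Dict String (String × Int × Bool)) (f : PySem.Dict String String) => f.items.foldl meetAltUpd st) st).get? k)
      = pvComb (st.get? k) (pvVals L k) := by
  induction L with
  | nil => intro st; simp [pvVals, pvComb_nil]
  | cons f L ih =>
    intro st
    rw [List.foldl_cons, ih (fun g hg => hL g (List.mem_cons_of_mem _ hg)),
      inner_get, dict_vals' f (hL f (List.mem_cons_self)) k]
    have : pvVals (f :: L) k = (f.get? k).toList ++ pvVals L k := by simp [pvVals]
    rw [this, pvComb_append]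

theorem meetAltUpd_eq_insert :
    meetAltUpd = fun st kv => st.insert kv.1
      (match st.get? kv.1 with
       | some (v0, c, s) => (v0, c + 1, s && (kv.2 == v0))
       | none => (kv.2, 1, true)) := by
  funext st kv
  unfold meetAltUpd
  cases h : st.get? kv.1 with
  | none => simp [h]
  | some t => obtain ⟨v0, c, s⟩ := t; simp [h]

theorem state_keys (L : List (PySem.Dict String String)) :
    ∀ st, ((L.foldl (fun (st : PySem.Dict String (String × Int × Bool)) (f : PySem.Dict String String) => f.items.foldl meetAltUpd st) st).keys)
      = PySem.Set.update st.keys (L.flatMap (fun f => f.keys)) := by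
  induction L with
  | nil => intro st; simp [PySem.Set.update_nil]
  | cons f L ih =>
    intro st
    rw [List.foldl_cons, ih]
    have hinner : (f.items.foldl meetAltUpd st).keys = PySem.Set.update st.keys f.keys := by
      rw [meetAltUpd_eq_insert]
      rw [PySem.Dict.keys_foldl_insert_key f.items (fun kv => kv.1) _ st]
      rw [PySem.Dict.keys.eq_1]
      rfl
    rw [hinner, List.flatMap_cons, PySem.Set.update_append]

theorem pvVals_len_le (L : List (PySem.Dict String String)) (k : String) :
    (pvVals L k).length ≤ L.length := by
  induction L with
  | nil => simp [pvVals]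
  | cons f L ih =>
    have h1 : ((f.get? k).toList).length ≤ 1 := by cases f.get? k <;> simp
    have h2 : pvVals (f :: L) k = (f.get? k).toList ++ pvVals L k := by simp [pvVals]
    rw [h2, List.length_append, List.length_cons]
    omega

theorem all_some_of_len_eq (L : List (PySem.Dict String String)) (k : String)
    (h : (pvVals L k).length = L.length) : ∀ f ∈ L, (f.get? k).isSome := by
  induction L with
  | nil => simp
  | cons f L ih =>
    intro g hg
    have hle := pvVals_len_le L k
    have h2 : pvVals (f :: L) k = (f.get? k).toList ++ pvVals L k := by simp [pvVals]
    rw [h2, List.length_append, List.length_cons] at h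
    cases hf : f.get? k with
    | none => rw [hf] at h; simp at h; omega
    | some v =>
      rw [hf] at h
      simp only [Option.toList_some, List.length_singleton] at h
      rcases List.mem_cons.1 hg with rfl | hg'
      · simp [hf]
      · exact ih (by omega) g hg'

theorem len_eq_of_all_some (L : List (PySem.Dict String String)) (k : String)
    (h : ∀ f ∈ L, (f.get? k).isSome) : (pvVals L k).length = L.length := by
  induction L with
  | nil => simp [pvVals]
  | cons f L ih =>
    have hf := h f List.mem_cons_self
    cases hg : f.get? k with
    | none => simp [hg] at hf
    | some v =>
      have h2 : pvVals (f :: L) k = (f.get? k).toList ++ pvVals L k := by simp [pvVals]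
      rw [h2, List.length_append, List.length_cons, hg,
        ih (fun g hgm => h g (List.mem_cons_of_mem _ hgm))]
      simp only [Option.toList_some, List.length_singleton]
      omega

theorem ofList_all_eq (xs : List String) (c : String) (hne : xs ≠ [])
    (h : ∀ x ∈ xs, x = c) : PySem.Set.ofList xs = [c] := by
  cases xs with
  | nil => exact absurd rfl hne
  | cons x xs =>
    have hx : x = c := h x List.mem_cons_self
    subst hx
    rw [PySem.Set.ofList_cons]
    have : (PySem.Set.ofList xs).discard x = [] := by
      rw [List.eq_nil_iff_forall_not_mem]
      intro y hy
      rw [PySem.Set.mem_discard] at hy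
      exact hy.2 ((h y (List.mem_cons_of_mem _ ((PySem.Set.mem_ofList xs y).1 hy.1))).trans rfl)
    rw [this]

theorem mem_gs_of_mem_vals (L : List (PySem.Dict String String)) (k v : String)
    (h : v ∈ pvVals L k) : v ∈ L.map (fun f => f.getD k "Top") := by
  rw [pvVals, List.mem_flatMap] at h
  obtain ⟨f, hf, hv⟩ := h
  cases hg : f.get? k with
  | none => rw [hg] at hv; simp at hv
  | some w =>
    rw [hg] at hv; simp at hv
    subst hv
    exact List.mem_map.2 ⟨f, hf, PySem.Dict.getD_of_get?_eq_some f "Top" hg⟩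

-- A's match gives 'Bottom' as soon as two distinct values occur among the gets
theorem meetVal_bottom (L : List (PySem.Dict String String)) (k x y : String)
    (hx : x ∈ L.map (fun f => f.getD k "Top")) (hy : y ∈ L.map (fun f => f.getD k "Top"))
    (hxy : x ≠ y) : meetVal L k = "Bottom" := by
  unfold meetVal
  cases hs : (PySem.Set.ofList (L.map (fun f => f.getD k "Top")) : PySem.Set String) with
  | nil => rfl
  | cons a t =>
    cases t with
    | nil =>
      exfalso
      have hx' := (PySem.Set.mem_ofList _ x).2 hx
      have hy' := (PySem.Set.mem_ofList _ y).2 hy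
      rw [hs] at hx' hy'
      simp at hx' hy'
      exact hxy (hx'.trans hy'.symm)
    | cons b t2 => rfl

-- membership in the values list
theorem mem_vals_of_get (L : List (PySem.Dict String String)) (k v : String)
    (f : PySem.Dict String String) (hf : f ∈ L) (hg : f.get? k = some v) :
    v ∈ pvVals L k := by
  rw [pvVals, List.mem_flatMap]
  exact ⟨f, hf, by simp [hg]⟩

-- full per-key agreement between A's set test and B's accumulated state
theorem pointwise (L : List (PySem.Dict String String)) (k : String)
    (v0 : String) (rest : List String) (hvals : pvVals L k = v0 :: rest) :
    meetVal L k = meetAltOut (L.length)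
      (k, ((pvComb none (pvVals L k)).getD ("", 0, false))) := by
  have hgetd : meetAltOut (L.length) (k, ((pvComb none (pvVals L k)).getD ("", 0, false)))
      = if rest.all (· == v0) && (((1 + (rest.length : Int)) == (L.length : Int)) || (v0 == "Top"))
        then v0 else "Bottom" := by
    rw [hvals]; rfl
  rw [hgetd]
  have hv0 : v0 ∈ pvVals L k := by rw [hvals]; exact List.mem_cons_self
  have hv0g : v0 ∈ L.map (fun f => f.getD k "Top") := mem_gs_of_mem_vals L k v0 hv0
  have hvalslen : (pvVals L k).length = rest.length + 1 := by rw [hvals]; simp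
  by_cases hsame : rest.all (· == v0) = true
  · have hallvals : ∀ v ∈ pvVals L k, v = v0 := by
      intro v hv
      rw [hvals] at hv
      rcases List.mem_cons.1 hv with rfl | hr
      · rfl
      · exact eq_of_beq (List.all_eq_true.1 hsame v hr)
    by_cases hcnt : (1 + (rest.length : Int)) = (L.length : Int)
    · have hlen : (pvVals L k).length = L.length := by
        rw [hvalslen]; exact_mod_cast (by push_cast at hcnt ⊢; omega : ((rest.length + 1 : Nat) : Int) = (L.length : Int))
      have hsome := all_some_of_len_eq L k hlen
      have hallg : ∀ x ∈ L.map (fun f => f.getD k "Top"), x = v0 := by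
        intro x hx
        obtain ⟨f, hf, rfl⟩ := List.mem_map.1 hx
        cases hgq : f.get? k with
        | none => have := hsome f hf; rw [hgq] at this; simp at this
        | some v =>
          rw [PySem.Dict.getD_of_get?_eq_some f "Top" hgq]
          exact hallvals v (mem_vals_of_get L k v f hf hgq)
      have hsingle := ofList_all_eq _ v0 (List.ne_nil_of_mem hv0g) hallg
      unfold meetVal
      rw [hsingle]
      simp [hsame, hcnt]
    · by_cases htop : v0 = "Top"
      · have hallg : ∀ x ∈ L.map (fun f => f.getD k "Top"), x = v0 := by
          intro x hx
          obtain ⟨f, hf, rfl⟩ := List.mem_map.1 hx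
          cases hgq : f.get? k with
          | none => rw [PySem.Dict.getD_of_get?_eq_none f "Top" hgq, htop]
          | some v =>
            rw [PySem.Dict.getD_of_get?_eq_some f "Top" hgq]
            exact hallvals v (mem_vals_of_get L k v f hf hgq)
        have hsingle := ofList_all_eq _ v0 (List.ne_nil_of_mem hv0g) hallg
        unfold meetVal
        rw [hsingle]
        subst htop
        simp [hsame]
      · -- some fact misses k: 'Top' and v0 are two distinct gets
        have hnotall : ¬ ∀ f ∈ L, (f.get? k).isSome := by
          intro hall
          have := len_eq_of_all_some L k hall
          rw [hvalslen] at this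
          apply hcnt
          push_cast [← this]
          ring
        obtain ⟨f, hf, hnone⟩ : ∃ f ∈ L, f.get? k = none := by
          by_contra hno
          push Not at hno
          apply hnotall
          intro f hf
          cases hq : f.get? k with
          | none => exact absurd hq (hno f hf)
          | some v => simp
        have htopg : "Top" ∈ L.map (fun f => f.getD k "Top") :=
          List.mem_map.2 ⟨f, hf, PySem.Dict.getD_of_get?_eq_none f "Top" hnone⟩
        rw [meetVal_bottom L k v0 "Top" hv0g htopg htop]
        simp [hsame, hcnt, htop]
  · -- two distinct values occur among the facts containing k
    obtain ⟨v, hvr, hvne⟩ : ∃ v ∈ rest, v ≠ v0 := by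
      by_contra hno
      push Not at hno
      exact hsame (List.all_eq_true.2 (fun x hx => beq_iff_eq.2 (hno x hx)))
    have hvv : v ∈ pvVals L k := by rw [hvals]; exact List.mem_cons_of_mem _ hvr
    have hvg := mem_gs_of_mem_vals L k v hvv
    rw [meetVal_bottom L k v v0 hvg hv0g hvne]
    simp [hsame]

-- bridging lemma: both outputs are maps over the shared deduplicated key list
theorem meet_eq_alt (facts : List (List (String × String))) : meet facts = meet_alt facts := by
  simp only [meet, meet_alt]
  set L := facts.map (fun f => PySem.Dict.ofList f) with hLdef
  have hL : ∀ f ∈ L, f.keys.Nodup := by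
    intro f hf
    obtain ⟨g, hg, rfl⟩ := List.mem_map.1 hf
    exact PySem.Dict.nodup_keys_ofList g
  set S := (PySem.Set.ofList (L.flatMap (fun f => f.keys)) : PySem.Set String) with hSdef
  have hSnd : S.Nodup := hSdef ▸ PySem.Set.nodup_ofList _
  set st := L.foldl (fun (st : PySem.Dict String (String × Int × Bool)) (f : PySem.Dict String String) => f.items.foldl meetAltUpd st) PySem.Dict.empty with hstdef
  have hkeys : st.keys = S := by
    rw [hstdef, state_keys L PySem.Dict.empty, PySem.Dict.keys_empty, PySem.Set.update_nil_left, hSdef]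
  have hnd : st.keys.Nodup := by rw [hkeys]; exact hSnd
  have hitems : st.items = S.map (fun k => (k, st.getD k ("", (0 : Int), false))) := by
    rw [PySem.Dict.items_eq_map_keys st hnd ("", (0 : Int), false), hkeys]
  have hB : ((st.items.foldl (fun res kv => res.insert kv.1 (meetAltOut (facts.length) kv)) PySem.Dict.empty).items)
      = st.items.map (fun kv => (kv.1, meetAltOut (facts.length) kv)) := by
    have hfresh : ∀ a ∈ st.items, (PySem.Dict.empty : PySem.Dict String String).contains ((fun (kv : String × (String × Int × Bool)) => kv.1) a) = false := by
      intro a _; exact PySem.Dict.contains_empty _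
    have hnodup : (st.items.map (fun (kv : String × (String × Int × Bool)) => kv.1)).Nodup := by
      have h1 : st.items.map (fun (kv : String × (String × Int × Bool)) => kv.1) = st.keys :=
        (PySem.Dict.keys.eq_1 st).symm
      rw [h1]; exact hnd
    simpa using PySem.Dict.items_foldl_insert_fresh st.items (fun kv => kv.1)
      (fun kv => meetAltOut (facts.length) kv) PySem.Dict.empty hfresh hnodup
  have hA : ((S.foldl (fun res key => res.insert key (meetVal L key)) PySem.Dict.empty).items)
      = S.map (fun key => (key, meetVal L key)) := by
    have hfresh : ∀ a ∈ S, (PySem.Dict.empty : PySem.Dict String String).contains ((fun (key : String) => key) a) = false := by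
      intro a _; exact PySem.Dict.contains_empty _
    simpa using PySem.Dict.items_foldl_insert_fresh S (fun key => key)
      (fun key => meetVal L key) PySem.Dict.empty hfresh (by simpa using hSnd)
  rw [hA, hB, hitems, List.map_map]
  apply List.map_congr_left
  intro k hk
  have hkS : k ∈ L.flatMap (fun f => f.keys) := (PySem.Set.mem_ofList _ k).1 (hSdef ▸ hk)
  obtain ⟨f, hf, hkf⟩ := List.mem_flatMap.1 hkS
  have hsome : (f.get? k).isSome := by
    rw [← PySem.Dict.contains_eq_isSome_get?]
    exact (PySem.Dict.contains_iff_mem_keys f k).2 hkf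
  obtain ⟨v, hv⟩ := Option.isSome_iff_exists.1 hsome
  have hmem : v ∈ pvVals L k := mem_vals_of_get L k v f hf hv
  obtain ⟨v0, rest, hvals⟩ : ∃ v0 rest, pvVals L k = v0 :: rest := by
    cases hpv : pvVals L k with
    | nil => rw [hpv] at hmem; simp at hmem
    | cons a t => exact ⟨a, t, rfl⟩
  have hget : st.get? k = pvComb none (pvVals L k) := by
    rw [hstdef, state_get L k hL PySem.Dict.empty, PySem.Dict.get?_empty]
  have hgetD : st.getD k ("", (0 : Int), false) = (pvComb none (pvVals L k)).getD ("", (0 : Int), false) := by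
    rw [PySem.Dict.getD_eq_get?_getD, hget]
  have hlen : ((L.length : Int)) = ((facts.length : Int)) := by rw [hLdef]; simp
  have hpw := pointwise L k v0 rest hvals
  show (k, meetVal L k) = (k, meetAltOut (facts.length) (k, st.getD k ("", (0 : Int), false)))
  rw [hpw, hgetD, hlen]

-- ===== VERDICT (by name: the statement is the Claim_ definition above) =====
theorem meet_spec : Claim_equal_meet := by
  intro facts _
  unfold Spec_meet
  exact meet_eq_alt facts
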